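-- pv_equiv track=rewrite | github.com/AdrianSuliga/WDI | 05 - Zadania z tablicami dwuwymiarowymi/ex_14.py | areTheyGood
-- ===== SOURCE A (Python) =====
-- def areTheyGood(a, b):
--     cntA, cntB = 0, 0
--     while a != 0:
--         if a % 2 == 1: cntA += 1
--         a //= 2
--     while b != 0:
--         if b % 2 == 1: cntB += 1
--         b //= 2
--     if cntA == cntB: return True
--     else: return False
-- ===== SOURCE B (Python) =====
-- def areTheyGood(a, b):
--     return bin(a).count('1') == bin(b).count('1')
-- ===== Notes on version B (the rewrite author's own statement) =====
-- stated objective: idiomatic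
-- what changed: Replaces the two explicit bit-peeling while-loops and counters with binary-string popcounts: bin(x).count('1') for each argument, compared directly.
-- outside the precondition, e.g. on areTheyGood(-1, 1): A does not finish within the time limit, B returns True
import Mathlib
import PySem

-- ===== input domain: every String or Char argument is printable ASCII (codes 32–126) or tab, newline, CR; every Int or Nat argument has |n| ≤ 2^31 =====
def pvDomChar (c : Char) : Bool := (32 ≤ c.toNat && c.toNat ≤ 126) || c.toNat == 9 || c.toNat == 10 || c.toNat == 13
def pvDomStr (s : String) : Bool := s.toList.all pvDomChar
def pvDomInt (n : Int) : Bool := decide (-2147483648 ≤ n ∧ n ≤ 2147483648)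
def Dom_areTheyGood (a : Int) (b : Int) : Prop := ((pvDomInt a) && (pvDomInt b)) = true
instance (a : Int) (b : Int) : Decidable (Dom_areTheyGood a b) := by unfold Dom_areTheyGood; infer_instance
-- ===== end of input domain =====

-- B replaces A's two explicit bit-peeling loops with binary-string popcounts
-- (bin(x).count('1')), compared directly; objective: idiomatic, same cost.

-- termination helper for both loops (cited by decreasing_by)
theorem pvHalf_lt (n : Int) (h : ¬ n ≤ 0) : (PySem.Int.floordiv n 2).toNat < n.toNat := by
  rw [PySem.Int.floordiv_eq_ediv_of_pos (by omega)]
  omega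

-- ===== PORT A =====
-- Python's 'while a != 0' diverges for a < 0 (a //= 2 stalls at -1); the guard
-- here is 'a ≤ 0' only to make the function total — Pre_ excludes negatives,
-- and on 0 ≤ a the guard coincides with 'a != 0'.
def pvLoopA (a : Int) (cnt : Int) : Int :=
  if h : a ≤ 0 then cnt
  else pvLoopA (PySem.Int.floordiv a 2) (if PySem.Int.mod a 2 = 1 then cnt + 1 else cnt)
termination_by a.toNat
decreasing_by exact pvHalf_lt a h

def areTheyGood (a : Int) (b : Int) : Bool :=
  let cntA := pvLoopA a 0
  let cntB := pvLoopA b 0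
  if cntA = cntB then true else false

-- ===== PORT B =====
-- pyBin n = the character list of Python's bin(n); exact for all ints
-- (negative → '-0b…'); .count '1' on a single char equals str.count('1').
def pvBinDigits (n : Int) : List Char :=
  if h : n ≤ 0 then []
  else pvBinDigits (PySem.Int.floordiv n 2) ++ [if PySem.Int.mod n 2 = 1 then '1' else '0']
termination_by n.toNat
decreasing_by exact pvHalf_lt n h

def pvBin (n : Int) : List Char :=
  if n < 0 then '-' :: '0' :: 'b' :: pvBinDigits (-n)
  else if n = 0 then ['0', 'b', '0']
  else '0' :: 'b' :: pvBinDigits n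

def areTheyGood_alt (a : Int) (b : Int) : Bool :=
  (pvBin a).count '1' == (pvBin b).count '1'

-- ===== PRECONDITION & SPEC =====
-- Pre_ excludes negative arguments: there Python A never terminates
-- (a //= 2 converges to -1, the loop never exits).
def Pre_areTheyGood (a : Int) (b : Int) : Prop := 0 ≤ a ∧ 0 ≤ b
instance (a : Int) (b : Int) : Decidable (Pre_areTheyGood a b) := by unfold Pre_areTheyGood; infer_instance
def pvWitness_areTheyGood : Int × Int := (5, 3)

def Spec_areTheyGood (a : Int) (b : Int) (out : Bool) : Prop := out = areTheyGood_alt a b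
instance (a : Int) (b : Int) (out : Bool) : Decidable (Spec_areTheyGood a b out) := by unfold Spec_areTheyGood; infer_instance

-- ===== CLAIM =====
def Claim_equal_areTheyGood : Prop := ∀ (a : Int) (b : Int), Dom_areTheyGood a b → Pre_areTheyGood a b → Spec_areTheyGood a b (areTheyGood a b)

-- ===== LEMMAS AND PROOFS =====

-- A's counter equals the number of '1' digits B's binary string carries.
theorem pvLoopA_eq (a : Int) (cnt : Int) : pvLoopA a cnt = cnt + ((pvBinDigits a).count '1' : Int) := by
  induction a, cnt using pvLoopA.induct with
  | case1 a cnt h =>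
    rw [pvLoopA, pvBinDigits]
    simp [h]
  | case2 a cnt h ih =>
    rw [pvLoopA, pvBinDigits]
    simp only [h, dite_false]
    simp only [dite_eq_ite] at ih
    rw [ih]
    by_cases hm : PySem.Int.mod a 2 = 1 <;>
      rw [PySem.Int.mod_eq_emod_of_pos (by norm_num)] at hm <;>
      simp [hm, List.count_append] <;> push_cast <;> ring

theorem pvBin_count (n : Int) (hn : 0 ≤ n) : (pvBin n).count '1' = (pvBinDigits n).count '1' := by
  rcases eq_or_lt_of_le hn with h | h
  · subst h
    rw [pvBinDigits]
    simp [pvBin]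
  · simp [pvBin, not_lt.mpr hn, h.ne']

-- ===== VERDICT =====
theorem areTheyGood_spec : Claim_equal_areTheyGood := by
  intro a b _ ⟨ha, hb⟩
  unfold Spec_areTheyGood areTheyGood areTheyGood_alt
  rw [pvLoopA_eq a 0, pvLoopA_eq b 0, pvBin_count a ha, pvBin_count b hb]
  simp only [zero_add]
  split_ifs with h
  · exact (Eq.symm (decide_eq_true (by exact_mod_cast h)))
  · exact (Eq.symm (decide_eq_false (fun hc => h (by exact_mod_cast hc))))
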